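-- pv_equiv track=rewrite | github.com/joras/aoc2019 | day03.py | walkWire
-- ===== SOURCE A (Python) =====
-- def walkWire(wire):
--     dirs = {'U': (0, -1), 'D': (0, 1), 'L': (-1, 0), 'R': (1, 0)}
--     pos = (0, 0)
--     positions = {}
--     steps = 0
--     for cmd in wire:
--         dir = dirs[cmd[0]]
--         times = cmd[1]
--         for _ in range(times):
--             steps += 1
--             pos = (pos[0]+dir[0], pos[1]+dir[1])
--             if pos not in positions:
--                 positions[pos] = steps
--     return positions
-- ===== SOURCE B (Python) =====
-- def walkWire(wire):
--     dirs = {'U': (0, -1), 'D': (0, 1), 'L': (-1, 0), 'R': (1, 0)}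
--     path = [(0, 0)]
--     for cmd in wire:
--         dx, dy = dirs[cmd[0]]
--         x, y = path[-1]
--         path += [(x + dx * k, y + dy * k) for k in range(1, cmd[1] + 1)]
--     positions = {}
--     for step, p in enumerate(path[1:], 1):
--         positions.setdefault(p, step)
--     return positions
-- ===== Notes on version B (the rewrite author's own statement) =====
-- stated objective: alternative
-- what changed: B first expands the wire into an explicit path list with a closed-form per-segment comprehension (start + direction*k), then records first-visit steps in a separate enumerate/setdefault pass, instead of A's single fused unit-step loop mutating pos/steps/dict together.
import Mathlib
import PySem

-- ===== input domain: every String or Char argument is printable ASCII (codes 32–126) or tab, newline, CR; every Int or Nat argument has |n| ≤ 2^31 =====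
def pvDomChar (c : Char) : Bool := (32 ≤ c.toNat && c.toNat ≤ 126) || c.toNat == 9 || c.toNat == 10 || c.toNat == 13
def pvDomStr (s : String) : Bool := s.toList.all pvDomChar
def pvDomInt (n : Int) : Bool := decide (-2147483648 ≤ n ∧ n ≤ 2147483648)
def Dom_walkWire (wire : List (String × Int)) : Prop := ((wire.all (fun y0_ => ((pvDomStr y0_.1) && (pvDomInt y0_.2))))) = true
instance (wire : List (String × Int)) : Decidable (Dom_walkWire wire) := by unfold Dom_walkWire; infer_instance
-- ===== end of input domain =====

-- B expands the wire into an explicit path list with a closed-form per-segment comprehension,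
-- then records first-visit steps in a separate enumerate/setdefault pass (alternative decomposition, same cost).

-- ===== PORT A =====
def dirsA : PySem.Dict String (Int × Int) :=
  PySem.Dict.ofList [("U", (0, -1)), ("D", (0, 1)), ("L", (-1, 0)), ("R", (1, 0))]

def walkWireLoop (st : (Int × Int) × PySem.Dict (Int × Int) Int × Int) (cmd : String × Int) :
    (Int × Int) × PySem.Dict (Int × Int) Int × Int :=
  -- dirs[cmd[0]]: a missing key is a KeyError, excluded by Pre_; the .getD default is never read there
  let dir := (dirsA.get? cmd.1).getD (0, 0)
  (PySem.List.pyRange 0 cmd.2 1).foldl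
    (fun st _ =>
      let steps := st.2.2 + 1
      let pos : Int × Int := (st.1.1 + dir.1, st.1.2 + dir.2)
      let positions := if st.2.1.contains pos then st.2.1 else st.2.1.insert pos steps
      (pos, positions, steps)) st

def walkWire (wire : List (String × Int)) : List (Int × Int × Int) :=
  ((wire.foldl walkWireLoop ((0, 0), PySem.Dict.empty, 0)).2.1).items.map
    (fun q => (q.1.1, q.1.2, q.2))

-- ===== PORT B =====
def dirsB : PySem.Dict String (Int × Int) :=
  PySem.Dict.ofList [("U", (0, -1)), ("D", (0, 1)), ("L", (-1, 0)), ("R", (1, 0))]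

def segmentB (x y dx dy t : Int) : List (Int × Int) :=
  (PySem.List.pyRange 1 (t + 1) 1).map (fun k => (x + dx * k, y + dy * k))

def pathStepB (path : List (Int × Int)) (cmd : String × Int) : List (Int × Int) :=
  -- dirs[cmd[0]]: missing key excluded by Pre_, default never read there
  let d := (dirsB.get? cmd.1).getD (0, 0)
  let last := PySem.List.pyGetD path (-1) (0, 0)  -- path[-1]; path is never empty
  path ++ segmentB last.1 last.2 d.1 d.2 cmd.2

def pathB (wire : List (String × Int)) : List (Int × Int) :=
  wire.foldl pathStepB [(0, 0)]

def walkWire_alt (wire : List (String × Int)) : List (Int × Int × Int) :=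
  let path := pathB wire
  ((PySem.List.enumerate (PySem.List.slice path (some 1) none) 1).foldl
      (fun positions sp => positions.setdefault sp.2 sp.1) PySem.Dict.empty).items.map
    (fun q => (q.1.1, q.1.2, q.2))

-- ===== PRECONDITION & SPEC =====
-- Pre_ excludes exactly the commands whose direction string is not a dict key: there Python A raises KeyError.
def Pre_walkWire (wire : List (String × Int)) : Prop :=
  ∀ cmd ∈ wire, cmd.1 = "U" ∨ cmd.1 = "D" ∨ cmd.1 = "L" ∨ cmd.1 = "R"
instance (wire : List (String × Int)) : Decidable (Pre_walkWire wire) := by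
  unfold Pre_walkWire; infer_instance

def pvWitness_walkWire : (List (String × Int)) := [("R", 2), ("U", 1), ("L", 3)]

def Spec_walkWire (wire : List (String × Int)) (out : List (Int × Int × Int)) : Prop := out = walkWire_alt wire
instance (wire : List (String × Int)) (out : List (Int × Int × Int)) : Decidable (Spec_walkWire wire out) := by unfold Spec_walkWire; infer_instance

-- ===== CLAIM (what is proved, stated in full; the proofs are below) =====
def Claim_equal_walkWire : Prop := ∀ (wire : List (String × Int)), Dom_walkWire wire → Pre_walkWire wire → Spec_walkWire wire (walkWire wire)

-- ===== LEMMAS AND PROOFS =====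

-- direction looked up for a command (the common value both ports compute)
def dirOfPv (cmd : String × Int) : Int × Int := (dirsA.get? cmd.1).getD (0, 0)

-- the cells of one segment of length n starting (exclusive) at p, direction d
def segListPv (p d : Int × Int) (n : Nat) : List (Int × Int) :=
  (List.range n).map (fun (k : Nat) => (p.1 + d.1 * ((k : Int) + 1), p.2 + d.2 * ((k : Int) + 1)))

-- the whole path (excluding the origin) traced from p by the wire
def flatPv : (Int × Int) → List (String × Int) → List (Int × Int)
  | _, [] => []
  | p, c :: w =>
      let d := dirOfPv c
      segListPv p d c.2.toNat ++
        flatPv (p.1 + d.1 * (c.2.toNat : Int), p.2 + d.2 * (c.2.toNat : Int)) w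

-- the endpoint of that path
def pEndPv : (Int × Int) → List (String × Int) → Int × Int
  | p, [] => p
  | p, c :: w =>
      let d := dirOfPv c
      pEndPv (p.1 + d.1 * (c.2.toNat : Int), p.2 + d.2 * (c.2.toNat : Int)) w

-- first-visit recorder: walk the cells with a step counter, insert only fresh cells
def recDPv (d : PySem.Dict (Int × Int) Int) : List (Int × Int) → Int → PySem.Dict (Int × Int) Int
  | [], _ => d
  | p :: ps, s => recDPv (if d.contains p then d else d.insert p s) ps (s + 1)

theorem segListPv_length (p d : Int × Int) (n : Nat) : (segListPv p d n).length = n := by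
  simp [segListPv]

theorem segListPv_succ (p d : Int × Int) (n : Nat) :
    segListPv p d (n + 1) =
      segListPv p d n ++ [(p.1 + d.1 * ((n : Int) + 1), p.2 + d.2 * ((n : Int) + 1))] := by
  simp [segListPv, List.range_succ]

theorem recDPv_append (xs ys : List (Int × Int)) (d : PySem.Dict (Int × Int) Int) (s : Int) :
    recDPv d (xs ++ ys) s = recDPv (recDPv d xs s) ys (s + (xs.length : Int)) := by
  induction xs generalizing d s with
  | nil => simp [recDPv]
  | cons x xs ih =>
      simp only [List.cons_append, recDPv, ih, List.length_cons]
      congr 1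
      push_cast
      ring

theorem iterA (dir : Int × Int) (n : Nat) (p : Int × Int)
    (dict : PySem.Dict (Int × Int) Int) (s : Int) :
    (List.range n).foldl
      (fun st (_ : Nat) =>
        let steps := st.2.2 + 1
        let pos : Int × Int := (st.1.1 + dir.1, st.1.2 + dir.2)
        let positions := if st.2.1.contains pos then st.2.1 else st.2.1.insert pos steps
        (pos, positions, steps))
      (p, dict, s)
    = ((p.1 + dir.1 * (n : Int), p.2 + dir.2 * (n : Int)),
       recDPv dict (segListPv p dir n) (s + 1), s + (n : Int)) := by
  induction n with
  | zero => simp [segListPv, recDPv]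
  | succ n ih =>
      rw [List.range_succ, List.foldl_append, ih, List.foldl_cons, List.foldl_nil]
      rw [segListPv_succ, recDPv_append, segListPv_length]
      simp only [recDPv, Prod.mk.injEq]
      refine ⟨⟨by push_cast; ring, by push_cast; ring⟩, ?_, by push_cast; ring⟩
      have hx : (p.1 + dir.1 * (n : Int) + dir.1, p.2 + dir.2 * (n : Int) + dir.2)
          = (p.1 + dir.1 * ((n : Int) + 1), p.2 + dir.2 * ((n : Int) + 1)) := by
        rw [Prod.mk.injEq]; exact ⟨by ring, by ring⟩
      have hs : s + (n : Int) + 1 = s + 1 + (n : Int) := by ring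
      rw [hx, hs]

theorem loopA_eq (cmd : String × Int) (p : Int × Int)
    (dict : PySem.Dict (Int × Int) Int) (s : Int) :
    walkWireLoop (p, dict, s) cmd =
      ((p.1 + (dirOfPv cmd).1 * (cmd.2.toNat : Int), p.2 + (dirOfPv cmd).2 * (cmd.2.toNat : Int)),
       recDPv dict (segListPv p (dirOfPv cmd) cmd.2.toNat) (s + 1), s + (cmd.2.toNat : Int)) := by
  unfold walkWireLoop
  rw [PySem.List.pyRange_one, List.foldl_map]
  simpa using iterA (dirOfPv cmd) cmd.2.toNat p dict s

theorem foldA_eq (wire : List (String × Int)) (p : Int × Int)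
    (dict : PySem.Dict (Int × Int) Int) (s : Int) :
    wire.foldl walkWireLoop (p, dict, s) =
      (pEndPv p wire, recDPv dict (flatPv p wire) (s + 1),
       s + ((flatPv p wire).length : Int)) := by
  induction wire generalizing p dict s with
  | nil => simp [pEndPv, flatPv, recDPv]
  | cons c w ih =>
      rw [List.foldl_cons, loopA_eq, ih]
      simp only [pEndPv, flatPv, Prod.mk.injEq, List.length_append, segListPv_length]
      refine ⟨trivial, ?_, by push_cast; ring⟩
      rw [recDPv_append, segListPv_length]
      congr 1
      ring

theorem dirsB_eq : dirsB = dirsA := rfl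

theorem segmentB_eq (x y dx dy t : Int) :
    segmentB x y dx dy t = segListPv (x, y) (dx, dy) t.toNat := by
  unfold segmentB segListPv
  rw [PySem.List.pyRange_one, List.map_map]
  have ht : (t + 1 - 1).toNat = t.toNat := by omega
  rw [ht]
  refine List.map_congr_left ?_
  intro k _
  simp only [Function.comp]
  rw [Prod.mk.injEq]
  exact ⟨by ring, by ring⟩

theorem pathStepB_eq (pre : List (Int × Int)) (p : Int × Int) (c : String × Int) :
    pathStepB (pre ++ [p]) c = (pre ++ [p]) ++ segListPv p (dirOfPv c) c.2.toNat := by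
  unfold pathStepB
  simp only [PySem.List.pyGetD_neg_one_append_singleton, dirsB_eq]
  rw [segmentB_eq]
  rfl

theorem foldB_eq (wire : List (String × Int)) (pre : List (Int × Int)) (p : Int × Int) :
    wire.foldl pathStepB (pre ++ [p]) = (pre ++ [p]) ++ flatPv p wire := by
  induction wire generalizing pre p with
  | nil => simp [flatPv]
  | cons c w ih =>
      rw [List.foldl_cons, pathStepB_eq]
      rcases hn : c.2.toNat with _ | m
      · have h0 : segListPv p (dirOfPv c) 0 = [] := by simp [segListPv]
        rw [h0, List.append_nil, ih]
        simp [flatPv, hn, h0]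
      · rw [segListPv_succ, ← List.append_assoc,
            ih (pre ++ [p] ++ segListPv p (dirOfPv c) m)]
        simp only [flatPv, hn, segListPv_succ]
        push_cast
        simp [List.append_assoc]

theorem recE_eq (ps : List (Int × Int)) (s : Int) (d : PySem.Dict (Int × Int) Int) :
    (PySem.List.enumerate ps s).foldl
      (fun positions sp => positions.setdefault sp.2 sp.1) d = recDPv d ps s := by
  induction ps generalizing s d with
  | nil => simp [PySem.List.enumerate_nil, recDPv]
  | cons x ps ih =>
      rw [PySem.List.enumerate_cons, List.foldl_cons, ih]
      simp only [recDPv]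
      by_cases h : d.contains x
      · rw [PySem.Dict.setdefault_of_contains d s h, if_pos h]
      · rw [PySem.Dict.setdefault_of_not_contains d s (by simpa using h), if_neg h]

-- ===== VERDICT (by name: the statement is the Claim_ definition above) =====
theorem walkWire_spec : Claim_equal_walkWire := by
  intro wire _ _
  unfold Spec_walkWire walkWire walkWire_alt pathB
  have hp : ([] : List (Int × Int)) ++ [((0 : Int), (0 : Int))] = [(0, 0)] := rfl
  rw [foldA_eq, ← hp, foldB_eq]
  simp only [List.nil_append, List.singleton_append, PySem.List.slice_from_one, List.tail_cons]
  rw [recE_eq]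
  norm_num
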